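-- pv_equiv track=rewrite | github.com/hrnciar/mini-mass-rebuild | obsolete_packages.py | bump_release
-- ===== SOURCE A (Python) =====
-- def bump_release(evr):
--     ev, _, release = evr.rpartition('-')
--     parts = release.split('.')
--     release = []
--     for part in parts:
--         if part == '0':
--             release.append(part)
--         else:
--             try:
--                 release.append(str(int(part) + 1))
--             except ValueError:
--                 release.append(part)
--                 release.append("MANUAL")
--             release = '.'.join(release)
--             return f'{ev}-{release}'
--     else:
--         raise RuntimeError(f'Cannot bump {evr}')
-- ===== SOURCE B (Python) =====
-- def bump_release(evr):
--     ev, _, rel = evr.rpartition('-')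
--     # Consume the run of literal "0." components at string level.
--     k = 0
--     while rel.startswith('0.'):
--         rel = rel[2:]
--         k += 1
--     head = rel.partition('.')[0]
--     if head == '0':
--         raise RuntimeError(f'Cannot bump {evr}')
--     try:
--         tail = str(int(head) + 1)
--     except ValueError:
--         tail = head + '.MANUAL'
--     return f"{ev}-{'0.' * k}{tail}"
-- ===== Notes on version B (the rewrite author's own statement) =====
-- stated objective: alternative
-- what changed: B never splits the release into a parts list: it works directly on the string, consuming the run of literal '0.' prefixes with a while loop, bumping the token before the next dot, and rebuilding the prefix as '0.'*k, instead of A's split('.')-then-accumulate-per-part loop.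
import Mathlib
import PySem

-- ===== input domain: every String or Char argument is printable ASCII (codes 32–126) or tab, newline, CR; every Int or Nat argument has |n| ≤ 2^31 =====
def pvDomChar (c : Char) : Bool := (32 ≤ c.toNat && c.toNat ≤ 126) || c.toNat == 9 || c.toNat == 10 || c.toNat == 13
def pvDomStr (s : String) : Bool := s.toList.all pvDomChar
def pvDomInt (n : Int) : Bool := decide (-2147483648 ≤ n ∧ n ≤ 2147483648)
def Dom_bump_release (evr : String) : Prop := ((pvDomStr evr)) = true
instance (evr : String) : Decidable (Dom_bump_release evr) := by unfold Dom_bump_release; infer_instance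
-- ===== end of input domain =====

-- B works at STRING level: it consumes the run of literal "0." prefixes of the release
-- string, then bumps the token before the next '.', instead of A's split-into-parts
-- accumulator loop (alternative decomposition, same cost).
-- Both Pythons raise RuntimeError when every release part is '0'; Pre_ excludes exactly those inputs.

-- s.rpartition(sep) for a single-character sep, returning (head, tail) where the
-- full Python result is (head, sep, tail), or ('', '', s) when sep is absent.
-- Exact: scans from the right for the last occurrence of sep.
def pyRPartitionChar (s : List Char) (sep : Char) : List Char × List Char :=
  let sp := s.reverse.span (fun c => c ≠ sep)
  match sp.2 with
  | [] => ([], s)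
  | _ :: pre => (pre.reverse, sp.1.reverse)

-- s.split('.') for the single-character separator '.': exact hand port
-- (every '.' ends a piece; no merging; empty pieces kept, as in Python).
def splitDot : List Char → List (List Char)
  | [] => [[]]
  | c :: rest =>
    if c = '.' then [] :: splitDot rest
    else
      match splitDot rest with
      | p :: ps => (c :: p) :: ps
      | [] => [[c]]   -- unreachable: splitDot never returns []

-- ===== PORT A =====
-- the for-loop of A: acc is the Python list `release`; none = fall through to RuntimeError
def bumpLoopA (ev : List Char) (parts : List (List Char)) (acc : List (List Char)) :
    Option (List Char) :=
  match parts with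
  | [] => none
  | p :: rest =>
    if p = ['0'] then bumpLoopA ev rest (acc ++ [p])
    else
      let acc' :=
        match PySem.Int.ofChars? p with
        | some n => acc ++ [PySem.Int.toChars (n + 1)]
        | none => acc ++ [p] ++ ["MANUAL".toList]
      some (ev ++ ['-'] ++ PySem.Chars.join ['.'] acc')

def bump_release (evr : String) : String :=
  let pr := pyRPartitionChar evr.toList '-'
  let parts := splitDot pr.2
  match bumpLoopA pr.1 parts [] with
  | some r => String.ofList r
  | none => ""   -- Python raises RuntimeError here; excluded by Pre_

-- ===== PORT B =====
-- the while-loop of B: strip leading "0." repetitions, counting them (k, remainder)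
def stripZeroDot : List Char → Nat × List Char
  | c :: c' :: rest =>               -- rel.startswith('0.'); rel = rel[2:]
    if c = '0' ∧ c' = '.' then
      let r := stripZeroDot rest
      (r.1 + 1, r.2)
    else (0, c :: c' :: rest)
  | rel => (0, rel)

def bump_release_alt (evr : String) : String :=
  let pr := pyRPartitionChar evr.toList '-'
  let kr := stripZeroDot pr.2
  let head := kr.2.takeWhile (· ≠ '.')   -- rel.partition('.')[0]: prefix before the first '.'
  if head = ['0'] then ""   -- Python raises RuntimeError here; excluded by Pre_
  else
    let tail :=
      match PySem.Int.ofChars? head with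
      | some n => PySem.Int.toChars (n + 1)
      | none => head ++ ".MANUAL".toList
    -- f"{ev}-{'0.' * k}{tail}"
    String.ofList (pr.1 ++ ['-'] ++ (List.replicate kr.1 ['0', '.']).flatten ++ tail)

-- ===== PRECONDITION & SPEC =====
-- A (and B) raise RuntimeError exactly when every '.'-separated part of the
-- release component is the literal string '0'; Pre_ excludes those inputs.
def Pre_bump_release (evr : String) : Prop :=
  ((splitDot (pyRPartitionChar evr.toList '-').2).any (fun p => p ≠ ['0'])) = true
instance (evr : String) : Decidable (Pre_bump_release evr) := by
  unfold Pre_bump_release; infer_instance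
def pvWitness_bump_release : String := "1-0.2"

def Spec_bump_release (evr : String) (out : String) : Prop := out = bump_release_alt evr
instance (evr : String) (out : String) : Decidable (Spec_bump_release evr out) := by
  unfold Spec_bump_release; infer_instance

-- ===== CLAIM (what is proved, stated in full; the proofs are below) =====
def Claim_equal_bump_release : Prop :=
  ∀ (evr : String), Dom_bump_release evr → Pre_bump_release evr →
    Spec_bump_release evr (bump_release evr)

-- ===== LEMMAS AND PROOFS =====

-- proof-only helpers: the pieces A's loop appends after the accumulated '0' parts
def bumpOne (p : List Char) : List (List Char) :=
  match PySem.Int.ofChars? p with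
  | some n => [PySem.Int.toChars (n + 1)]
  | none => [p, "MANUAL".toList]

-- the list of parts A's loop would join (none = fall through to RuntimeError)
def resParts : List (List Char) → Option (List (List Char))
  | [] => none
  | p :: rest => if p = ['0'] then (resParts rest).map (p :: ·) else some (bumpOne p)

lemma splitDot_ne_nil (s : List Char) : splitDot s ≠ [] := by
  cases s with
  | nil => simp [splitDot]
  | cons c rest =>
    simp only [splitDot]
    split
    · simp
    · split <;> simp

lemma splitDot_zero_dot (rest : List Char) :
    splitDot ('0' :: '.' :: rest) = ['0'] :: splitDot rest := by
  simp [splitDot]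

-- head of splitDot is the prefix before the first '.'
lemma splitDot_head (s : List Char) :
    (splitDot s).headD [] = s.takeWhile (· ≠ '.') := by
  induction s with
  | nil => simp [splitDot]
  | cons c rest ih =>
    by_cases hc : c = '.'
    · simp [splitDot, hc]
    · simp only [splitDot, hc, if_false, List.takeWhile]
      cases h : splitDot rest with
      | nil => exact absurd h (splitDot_ne_nil rest)
      | cons p ps => simp_all

lemma bumpLoopA_eq_resParts (ev : List Char) (parts acc : List (List Char)) :
    bumpLoopA ev parts acc =
      (resParts parts).map
        (fun l => ev ++ ['-'] ++ PySem.Chars.join ['.'] (acc ++ l)) := by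
  induction parts generalizing acc with
  | nil => rfl
  | cons p rest ih =>
    by_cases hp : p = ['0']
    · simp only [bumpLoopA, resParts, hp, if_true, ih]
      cases resParts rest <;> simp [List.append_assoc]
    · simp only [bumpLoopA, resParts, hp, if_false, bumpOne, ite_false]
      cases h : PySem.Int.ofChars? p <;> simp [h, List.append_assoc]

lemma resParts_splitDot (s : List Char) :
    resParts (splitDot s) =
      (if (stripZeroDot s).2.takeWhile (· ≠ '.') = ['0'] then none
       else some (List.replicate (stripZeroDot s).1 ['0'] ++
                  bumpOne ((stripZeroDot s).2.takeWhile (· ≠ '.')))) := by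
  induction s using stripZeroDot.induct with
  | case1 c c' rest h ih =>
    obtain ⟨rfl, rfl⟩ := h
    rw [splitDot_zero_dot]
    simp only [resParts, if_true, ih, stripZeroDot, and_self, reduceIte]
    split
    · simp
    · simp [List.replicate_succ]
  | case2 c c' rest h =>
    have hfix : stripZeroDot (c :: c' :: rest) = (0, c :: c' :: rest) := by
      simp [stripZeroDot, h]
    rw [hfix]
    simp only
    have hhead := splitDot_head (c :: c' :: rest)
    by_cases hp : (c :: c' :: rest).takeWhile (· ≠ '.') = ['0']
    · exfalso
      rw [List.takeWhile_cons] at hp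
      by_cases hc : c = '.'
      · simp [hc] at hp
      · rw [if_pos (by simp [hc])] at hp
        have hc0 : c = '0' := by simpa using List.head_eq_of_cons_eq hp
        have htail : (c' :: rest).takeWhile (· ≠ '.') = [] := List.tail_eq_of_cons_eq hp
        rw [List.takeWhile_cons] at htail
        by_cases hd : c' = '.'
        · exact h ⟨hc0, hd⟩
        · rw [if_pos (by simp [hd])] at htail
          exact absurd htail (by simp)
    · rw [if_neg hp]
      cases hs : splitDot (c :: c' :: rest) with
      | nil => exact absurd hs (splitDot_ne_nil _)
      | cons p ps =>
        rw [hs] at hhead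
        simp only [List.headD_cons] at hhead
        subst hhead
        have hp' : ¬ List.takeWhile (fun x => !decide (x = '.')) (c :: c' :: rest) = ['0'] := by
          simpa using hp
        simp [resParts, hp']
  | case3 rel hne =>
    cases rel with
    | nil => simp [splitDot, resParts, stripZeroDot]
    | cons c rest =>
      cases rest with
      | cons c' rest' => exact absurd rfl (hne c c' rest')
      | nil =>
        have hfix : stripZeroDot [c] = (0, [c]) := rfl
        rw [hfix]
        by_cases hc0 : c = '0'
        · subst hc0
          simp [splitDot, resParts, List.takeWhile_cons]
        · by_cases hc : c = '.'
          · simp [splitDot, hc, resParts, List.takeWhile_cons]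
          · have h1 : List.takeWhile (· ≠ '.') [c] = [c] := by
              simp [List.takeWhile_cons, hc]
            rw [h1, if_neg (by simp [hc0])]
            simp [splitDot, hc, resParts, hc0]

lemma join_replicate_zero (k : Nat) (l : List (List Char)) (x : List Char) (xs : List (List Char))
    (hl : l = x :: xs) :
    PySem.Chars.join ['.'] (List.replicate k ['0'] ++ l) =
      (List.replicate k ['0', '.']).flatten ++ PySem.Chars.join ['.'] l := by
  induction k with
  | zero => simp
  | succ k ih =>
    rw [List.replicate_succ, List.replicate_succ, List.cons_append]
    have hne : List.replicate k (['0'] : List Char) ++ l = (List.replicate k ['0'] ++ l).headD [] :: (List.replicate k ['0'] ++ l).tail := by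
      cases hk : List.replicate k (['0'] : List Char) ++ l with
      | nil =>
        exfalso
        rw [hl] at hk
        exact absurd hk (by simp)
      | cons q rest => simp
    rw [hne, PySem.Chars.join_cons_cons, ← hne, ih]
    simp

lemma dotMANUAL : (".MANUAL".toList : List Char) = ['.'] ++ "MANUAL".toList := by decide

lemma resParts_eq_none (parts : List (List Char)) (h : resParts parts = none) :
    (parts.any (fun p => p ≠ ['0'])) = false := by
  induction parts with
  | nil => simp
  | cons p rest ih =>
    by_cases hp : p = ['0']
    · simp only [resParts, hp, if_true] at h
      cases hres : resParts rest with
      | some l => rw [hres] at h; simp at h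
      | none =>
        have := ih hres
        simp only [List.any_cons, hp, decide_not]
        simpa using this
    · simp [resParts, hp] at h

lemma main_eq (ev s : List Char)
    (hpre : ((splitDot s).any (fun p => p ≠ ['0'])) = true) :
    (match bumpLoopA ev (splitDot s) [] with
     | some r => String.ofList r
     | none => "") =
    (let kr := stripZeroDot s
     let head := kr.2.takeWhile (· ≠ '.')
     if head = ['0'] then ""
     else
       let tail :=
         match PySem.Int.ofChars? head with
         | some n => PySem.Int.toChars (n + 1)
         | none => head ++ ".MANUAL".toList
       String.ofList (ev ++ ['-'] ++ (List.replicate kr.1 ['0', '.']).flatten ++ tail)) := by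
  rw [bumpLoopA_eq_resParts, resParts_splitDot]
  by_cases hp : (stripZeroDot s).2.takeWhile (· ≠ '.') = ['0']
  · exfalso
    have hn : resParts (splitDot s) = none := by rw [resParts_splitDot, if_pos hp]
    rw [resParts_eq_none _ hn] at hpre
    exact Bool.false_ne_true hpre
  · rw [if_neg hp]
    simp only [Option.map_some, List.nil_append, if_neg hp]
    unfold bumpOne
    cases h : PySem.Int.ofChars? ((stripZeroDot s).2.takeWhile (· ≠ '.')) with
    | some n =>
      rw [join_replicate_zero _ _ _ [] rfl, PySem.Chars.join_singleton]
      simp [List.append_assoc]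
    | none =>
      rw [join_replicate_zero _ _ _ [_] rfl, PySem.Chars.join_cons_cons,
        PySem.Chars.join_singleton, dotMANUAL]
      simp [List.append_assoc]

-- ===== VERDICT (by name: the statement is the Claim_ definition above) =====
theorem bump_release_spec : Claim_equal_bump_release := by
  intro evr _ hpre
  unfold Pre_bump_release at hpre
  unfold Spec_bump_release bump_release bump_release_alt
  exact main_eq _ _ hpre
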